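-- pv_equiv track=rewrite | github.com/ashebanow/dotfiles | bin/format_toml_tags.py | sort_tags_by_prefix
-- ===== SOURCE A (Python) =====
-- def sort_tags_by_prefix(tags):
--     """Sort tags alphabetically while keeping prefix groups together."""
--     if not tags:
--         return []
--
--     # Group tags by prefix (everything before first colon)
--     prefix_groups = {}
--     no_prefix = []
--
--     for tag in tags:
--         if ':' in tag:
--             prefix = tag.split(':', 1)[0]
--             if prefix not in prefix_groups:
--                 prefix_groups[prefix] = []
--             prefix_groups[prefix].append(tag)
--         else:
--             no_prefix.append(tag)
--
--     # Sort within each prefix group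
--     for prefix in prefix_groups:
--         prefix_groups[prefix].sort()
--
--     # Sort tags without prefixes
--     no_prefix.sort()
--
--     # Combine: sorted prefixes, then their tags, then no-prefix tags
--     result = []
--     for prefix in sorted(prefix_groups.keys()):
--         result.extend(prefix_groups[prefix])
--     result.extend(no_prefix)
--
--     return result
-- ===== SOURCE B (Python) =====
-- def sort_tags_by_prefix(tags):
--     """Sort tags alphabetically while keeping prefix groups together."""
--     def key(tag):
--         if ':' in tag:
--             return (0, tag.split(':', 1)[0], tag)
--         return (1, '', tag)
--     return sorted(tags, key=key)
-- ===== Notes on version B (the rewrite author's own statement) =====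
-- stated objective: simpler
-- what changed: A's explicit grouping dict, per-group sorts and concatenation loop are replaced by one stable sorted() call under the tuple key (0, prefix, tag) for prefixed tags and (1, '', tag) for the rest.
import Mathlib
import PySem

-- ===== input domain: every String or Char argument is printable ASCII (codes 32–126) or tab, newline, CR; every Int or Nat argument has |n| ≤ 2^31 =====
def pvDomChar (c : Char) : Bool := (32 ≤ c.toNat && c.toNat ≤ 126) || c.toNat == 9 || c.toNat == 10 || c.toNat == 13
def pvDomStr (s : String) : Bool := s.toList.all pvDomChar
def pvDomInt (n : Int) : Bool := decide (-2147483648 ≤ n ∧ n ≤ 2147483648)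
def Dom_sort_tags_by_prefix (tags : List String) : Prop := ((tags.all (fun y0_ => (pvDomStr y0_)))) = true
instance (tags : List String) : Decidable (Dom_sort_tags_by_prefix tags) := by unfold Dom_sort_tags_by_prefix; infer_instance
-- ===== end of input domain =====

-- B replaces A's group-dict-and-concatenate construction by a single stable sort under the
-- lexicographic key ((0, prefix, tag) for prefixed tags, (1, "", tag) otherwise); same cost class.

-- shared helper: `':' in tag` (both Pythons test this the same way)
def pyHasColon (t : String) : Bool := PySem.Str.isIn ":" t

-- shared helper: tag.split(':', 1)[0] — the characters before the first ':'.
-- Exact for every use here: both programs only apply it when ':' occurs in the tag,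
-- and the first piece of split(':', 1) is precisely the characters before the first ':'.
def pyPrefix (t : String) : String := String.ofList (t.toList.takeWhile (· ≠ ':'))

-- ===== PORT A =====
def sort_tags_by_prefix (tags : List String) : List String :=
  if tags = [] then []
  else
    -- for tag in tags: … build prefix_groups (a dict) and no_prefix (a list)
    let st := tags.foldl
      (fun (st : PySem.Dict String (List String) × List String) tag =>
        if pyHasColon tag then
          let p := pyPrefix tag
          -- if prefix not in prefix_groups: prefix_groups[prefix] = []
          let g := if st.1.contains p then st.1 else st.1.insert p []
          -- prefix_groups[prefix].append(tag)
          (g.insert p (g.getD p [] ++ [tag]), st.2)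
        else
          (st.1, st.2 ++ [tag]))
      (PySem.Dict.empty, [])
    -- for prefix in prefix_groups: prefix_groups[prefix].sort()  (each value sorted in place)
    let groups : PySem.Dict String (List String) :=
      PySem.Dict.mk (st.1.items.map (fun kv => (kv.1, PySem.List.sorted kv.2 (fun x => x) false)))
    -- no_prefix.sort()
    let noPrefix := PySem.List.sorted st.2 (fun x => x) false
    -- for prefix in sorted(prefix_groups.keys()): result.extend(prefix_groups[prefix])
    let result := (PySem.List.sorted groups.keys (fun x => x) false).foldl
      (fun res p => res ++ groups.getD p []) []
    result ++ noPrefix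

-- ===== PORT B =====
-- the Python tuple key (0, prefix, tag) / (1, '', tag): ported as the tuple key
-- ((0, prefix), tag) via PySem.List.sorted2 (the PySem form for tuple-valued sort keys),
-- whose comparison is exactly Python's tuple comparison
def tagKey1 (t : String) : Lex (Nat × String) :=
  if pyHasColon t then toLex (0, pyPrefix t) else toLex (1, "")

def sort_tags_by_prefix_alt (tags : List String) : List String :=
  PySem.List.sorted2 tags tagKey1 (fun t => t) false

-- ===== PRECONDITION & SPEC =====
def Spec_sort_tags_by_prefix (tags : List String) (out : List String) : Prop := out = sort_tags_by_prefix_alt tags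
instance (tags : List String) (out : List String) : Decidable (Spec_sort_tags_by_prefix tags out) := by unfold Spec_sort_tags_by_prefix; infer_instance

-- ===== CLAIM (what is proved, stated in full; the proofs are below) =====
def Claim_equal_sort_tags_by_prefix : Prop := ∀ (tags : List String), Dom_sort_tags_by_prefix tags → Spec_sort_tags_by_prefix tags (sort_tags_by_prefix tags)

-- ===== LEMMAS AND PROOFS =====

-- proof-side combined key: sorting by (tagKey1 t, t) lexicographically
def tagKey (t : String) : Lex (Lex (Nat × String) × String) := toLex (tagKey1 t, t)

-- sorted2 with keys k1, k2 is sorted with the lexicographic pair key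
lemma sorted2_eq_sorted_lex {α κ₁ κ₂ : Type} [LinearOrder κ₁] [LinearOrder κ₂]
    (xs : List α) (k1 : α → κ₁) (k2 : α → κ₂) :
    PySem.List.sorted2 xs k1 k2 false
      = PySem.List.sorted xs (fun x => toLex (k1 x, k2 x)) false := by
  unfold PySem.List.sorted2 PySem.List.sorted
  have hbefore : (fun (a b : α) => decide (k1 a < k1 b) || (!decide (k1 b < k1 a) && decide (k2 a < k2 b)))
      = fun a b => decide (toLex (k1 a, k2 a) < toLex (k1 b, k2 b)) := by
    funext a b
    by_cases h1 : k1 a < k1 b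
    · simp [h1, Prod.Lex.lt_iff]
    · by_cases h2 : k1 b < k1 a
      · simp [h1, h2, Prod.Lex.lt_iff, ne_of_gt h2]
      · have he : k1 a = k1 b := le_antisymm (not_lt.mp h2) (not_lt.mp h1)
        simp [he, Prod.Lex.lt_iff]
  simp only [if_neg (by simp : ¬ (false = true)), hbefore]

lemma alt_eq_sorted (tags : List String) :
    sort_tags_by_prefix_alt tags = PySem.List.sorted tags tagKey false := by
  unfold sort_tags_by_prefix_alt tagKey
  exact sorted2_eq_sorted_lex tags tagKey1 (fun t => t)

def upsert (gs : List (String × List String)) (p t : String) : List (String × List String) :=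
  if gs.any (fun kv => kv.1 == p) then
    gs.map (fun kv => if kv.1 == p then (p, kv.2 ++ [t]) else kv)
  else gs ++ [(p, [t])]

lemma upsert_keys (gs : List (String × List String)) (p t : String) :
    (upsert gs p t).map Prod.fst =
      if gs.any (fun kv => kv.1 == p) then gs.map Prod.fst else gs.map Prod.fst ++ [p] := by
  unfold upsert
  split_ifs with h
  · simp only [List.map_map]
    apply List.map_congr_left
    intro kv _
    by_cases hk : kv.1 = p <;> simp [hk]
  · simp

lemma upsert_keys_nodup (gs : List (String × List String)) (p t : String)
    (h : (gs.map Prod.fst).Nodup) : ((upsert gs p t).map Prod.fst).Nodup := by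
  rw [upsert_keys]
  split_ifs with hc
  · exact h
  · simp only [List.nodup_append, h, List.nodup_singleton, true_and]
    intro q hq q' hq'
    rw [List.mem_singleton] at hq'
    subst hq'
    intro hqp
    subst hqp
    simp only [List.any_eq_true, beq_iff_eq] at hc
    obtain ⟨kv, hkv, hk⟩ := List.mem_map.mp hq
    exact hc ⟨kv, hkv, hk⟩

lemma find?_of_nodup (gs : List (String × List String)) (kv : String × List String)
    (h : (gs.map Prod.fst).Nodup) (hm : kv ∈ gs) :
    gs.find? (fun e => e.1 == kv.1) = some kv := by
  induction gs with
  | nil => cases hm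
  | cons e rest ih =>
    simp only [List.map_cons, List.nodup_cons] at h
    rcases List.mem_cons.mp hm with he | hr
    · subst he
      simp [List.find?_cons_of_pos]
    · have hne : e.1 ≠ kv.1 := by
        intro heq
        exact h.1 (heq ▸ List.mem_map.mpr ⟨kv, hr, rfl⟩)
      rw [List.find?_cons_of_neg (by simpa using hne)]
      exact ih h.2 hr

lemma dict_step_eq_upsert (gs : List (String × List String)) (p t : String)
    (h : (gs.map Prod.fst).Nodup) :
    (let g := if (PySem.Dict.mk gs).contains p then PySem.Dict.mk gs
              else (PySem.Dict.mk gs).insert p []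
     g.insert p (g.getD p [] ++ [t])) = PySem.Dict.mk (upsert gs p t) := by
  by_cases hc : (gs.any fun kv => kv.1 == p) = true
  · obtain ⟨kv, hkv, hk⟩ := by simpa only [List.any_eq_true, beq_iff_eq] using hc
    have hfind : gs.find? (fun e => e.1 == p) = some kv := hk ▸ find?_of_nodup gs kv h hkv
    simp only [PySem.Dict.contains, PySem.Dict.insert, PySem.Dict.getD, PySem.Dict.get?,
      upsert, hc, if_true, hfind]
    apply congrArg PySem.Dict.mk
    apply List.map_congr_left
    intro e he
    by_cases hep : e.1 = p
    · have he2 : List.find? (fun x => x.1 == p) gs = some e := by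
        have := find?_of_nodup gs e h he
        rwa [hep] at this
      have : e = kv := by rw [he2] at hfind; exact Option.some.inj hfind
      simp [this]
    · simp [hep]
  · have hall : ∀ e ∈ gs, ¬(e.1 == p) = true := by
      intro e he
      simpa using (List.any_eq_true.not.mp hc) ∘ (fun hx => ⟨e, he, hx⟩)
    have hgs : List.find? (fun e => e.1 == p) gs = none :=
      List.find?_eq_none.mpr (by intro e he; simpa using hall e he)
    simp only [PySem.Dict.contains, PySem.Dict.insert, PySem.Dict.getD, PySem.Dict.get?, upsert]
    simp [hc, hgs]
    refine (List.map_congr_left ?_).trans (List.map_id gs)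
    intro e he
    simp [show ¬ e.1 = p from fun hx => hall e he (by simpa using hx)]

lemma foldA_eq (ts : List String) (gs : List (String × List String)) (np : List String)
    (h : (gs.map Prod.fst).Nodup) :
    ts.foldl
      (fun (st : PySem.Dict String (List String) × List String) tag =>
        if pyHasColon tag then
          let p := pyPrefix tag
          let g := if st.1.contains p then st.1 else st.1.insert p []
          (g.insert p (g.getD p [] ++ [tag]), st.2)
        else
          (st.1, st.2 ++ [tag]))
      (PySem.Dict.mk gs, np)
    = (PySem.Dict.mk (ts.foldl (fun gs t => if pyHasColon t then upsert gs (pyPrefix t) t else gs) gs),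
       np ++ ts.filter (fun t => !pyHasColon t)) := by
  induction ts generalizing gs np with
  | nil => simp
  | cons t rest ih =>
    rw [List.foldl_cons]
    by_cases hcl : pyHasColon t = true
    · have hstep : (if pyHasColon t then
          ((if (PySem.Dict.mk gs).contains (pyPrefix t) then PySem.Dict.mk gs
            else (PySem.Dict.mk gs).insert (pyPrefix t) []).insert (pyPrefix t)
            ((if (PySem.Dict.mk gs).contains (pyPrefix t) then PySem.Dict.mk gs
              else (PySem.Dict.mk gs).insert (pyPrefix t) []).getD (pyPrefix t) [] ++ [t]),
            np)
          else (PySem.Dict.mk gs, np ++ [t]))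
          = (PySem.Dict.mk (upsert gs (pyPrefix t) t), np) := by
        rw [if_pos hcl]
        exact congrArg (fun d => (d, np)) (dict_step_eq_upsert gs (pyPrefix t) t h)
      show List.foldl _ (if pyHasColon t then _ else _) rest = _
      rw [hstep, ih _ np (upsert_keys_nodup gs (pyPrefix t) t h)]
      simp [hcl]
    · show List.foldl _ (if pyHasColon t then _ else _) rest = _
      rw [if_neg hcl, ih gs (np ++ [t]) h]
      simp [hcl]

lemma upsert_flatMap_perm (gs : List (String × List String)) (p t : String)
    (h : (gs.map Prod.fst).Nodup) :
    ((upsert gs p t).flatMap Prod.snd).Perm (gs.flatMap Prod.snd ++ [t]) := by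
  unfold upsert
  split_ifs with hc
  · induction gs with
    | nil => simp at hc
    | cons e rest ih =>
      simp only [List.map_cons, List.nodup_cons] at h
      by_cases hep : (e.1 == p) = true
      · have hp : e.1 = p := by simpa using hep
        have hrest : List.map (fun kv => if kv.1 == p then (p, kv.2 ++ [t]) else kv) rest = rest := by
          refine (List.map_congr_left ?_).trans (List.map_id rest)
          intro x hx
          have hxp : ¬ x.1 = p := by
            intro hxp
            exact h.1 (List.mem_map.mpr ⟨x, hx, hxp.trans hp.symm⟩)
          simp [hxp]
        simp only [List.map_cons, hep, if_true, hrest, List.flatMap_cons, List.append_assoc]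
        exact List.Perm.append_left e.2 (by simpa using List.perm_append_comm (l₁ := [t]) (l₂ := rest.flatMap Prod.snd))
      · have hcr : (rest.any fun kv => kv.1 == p) = true := by
          rcases List.any_eq_true.mp hc with ⟨kv, hkv, hk⟩
          rcases List.mem_cons.mp hkv with rfl | hr
          · exact absurd hk hep
          · exact List.any_eq_true.mpr ⟨kv, hr, hk⟩
        simp only [List.map_cons, hep, Bool.false_eq_true, if_false, List.flatMap_cons, List.append_assoc]
        exact List.Perm.append_left e.2 (by simpa using ih h.2 hcr)
  · simp

def groupsOf (ts : List String) : List (String × List String) :=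
  ts.foldl (fun gs t => if pyHasColon t then upsert gs (pyPrefix t) t else gs) []

lemma foldG_keys_nodup (ts : List String) (gs : List (String × List String))
    (h : (gs.map Prod.fst).Nodup) :
    ((ts.foldl (fun gs t => if pyHasColon t then upsert gs (pyPrefix t) t else gs) gs).map
      Prod.fst).Nodup := by
  induction ts generalizing gs with
  | nil => exact h
  | cons t rest ih =>
    rw [List.foldl_cons]
    split_ifs with hcl
    · exact ih _ (upsert_keys_nodup gs (pyPrefix t) t h)
    · exact ih _ h

lemma groupsOf_keys_nodup (ts : List String) : ((groupsOf ts).map Prod.fst).Nodup :=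
  foldG_keys_nodup ts [] (by simp)

lemma upsert_mem_snd (gs : List (String × List String)) (p t : String)
    (kv : String × List String) (hkv : kv ∈ upsert gs p t) (x : String) (hx : x ∈ kv.2) :
    (∃ kv' ∈ gs, x ∈ kv'.2 ∧ kv'.1 = kv.1) ∨ (x = t ∧ kv.1 = p) := by
  unfold upsert at hkv
  split_ifs at hkv with hc
  · rcases List.mem_map.mp hkv with ⟨e, he, hek⟩
    by_cases hep : (e.1 == p) = true
    · rw [if_pos hep] at hek
      subst hek
      rcases List.mem_append.mp hx with hxe | hxt
      · exact Or.inl ⟨e, he, hxe, by simpa using hep⟩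
      · exact Or.inr ⟨List.mem_singleton.mp hxt, rfl⟩
    · rw [if_neg hep] at hek
      subst hek
      exact Or.inl ⟨e, he, hx, rfl⟩
  · rcases List.mem_append.mp hkv with he | hn
    · exact Or.inl ⟨kv, he, hx, rfl⟩
    · rw [List.mem_singleton.mp hn] at hx ⊢
      exact Or.inr ⟨by simpa using hx, rfl⟩

lemma foldG_mem (ts : List String) (gs : List (String × List String))
    (h : ∀ kv ∈ gs, ∀ x ∈ kv.2, pyHasColon x = true ∧ pyPrefix x = kv.1) :
    ∀ kv ∈ ts.foldl (fun gs t => if pyHasColon t then upsert gs (pyPrefix t) t else gs) gs,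
      ∀ x ∈ kv.2, pyHasColon x = true ∧ pyPrefix x = kv.1 := by
  induction ts generalizing gs with
  | nil => exact h
  | cons t rest ih =>
    rw [List.foldl_cons]
    split_ifs with hcl
    · refine ih _ ?_
      intro kv hkv x hx
      rcases upsert_mem_snd gs (pyPrefix t) t kv hkv x hx with ⟨kv', hkv', hxk, hkk⟩ | ⟨rfl, hk⟩
      · exact hkk ▸ h kv' hkv' x hxk
      · exact ⟨hcl, hk.symm⟩
    · exact ih _ h

lemma groupsOf_mem (ts : List String) :
    ∀ kv ∈ groupsOf ts, ∀ x ∈ kv.2, pyHasColon x = true ∧ pyPrefix x = kv.1 :=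
  foldG_mem ts [] (by simp)

lemma foldG_flatMap_perm (ts : List String) (gs : List (String × List String))
    (h : (gs.map Prod.fst).Nodup) :
    ((ts.foldl (fun gs t => if pyHasColon t then upsert gs (pyPrefix t) t else gs) gs).flatMap
      Prod.snd).Perm (gs.flatMap Prod.snd ++ ts.filter pyHasColon) := by
  induction ts generalizing gs with
  | nil => simp
  | cons t rest ih =>
    rw [List.foldl_cons, List.filter_cons]
    split_ifs with hcl
    · refine (ih _ (upsert_keys_nodup gs (pyPrefix t) t h)).trans ?_
      have := upsert_flatMap_perm gs (pyPrefix t) t h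
      calc ((upsert gs (pyPrefix t) t).flatMap Prod.snd ++ rest.filter pyHasColon).Perm
            ((gs.flatMap Prod.snd ++ [t]) ++ rest.filter pyHasColon) := this.append_right _
        _ = gs.flatMap Prod.snd ++ (t :: rest.filter pyHasColon) := by simp
    · exact ih _ h

lemma groupsOf_flatMap_perm (ts : List String) :
    ((groupsOf ts).flatMap Prod.snd).Perm (ts.filter pyHasColon) := by
  simpa using foldG_flatMap_perm ts [] (by simp)

lemma tagKey_inj : Function.Injective tagKey := by
  intro a b h
  exact congrArg Prod.snd (toLex.injective h)

lemma main_nonempty (tags : List String) :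
    (PySem.List.sorted
        ((groupsOf tags).map (fun kv => (kv.1, PySem.List.sorted kv.2 (fun x => x) false))
          |> PySem.Dict.mk |>.keys) (fun x => x) false).flatMap
      (fun p => ((groupsOf tags).map (fun kv => (kv.1, PySem.List.sorted kv.2 (fun x => x) false))
          |> PySem.Dict.mk |>.getD p [])) ++
      PySem.List.sorted (tags.filter (fun t => !pyHasColon t)) (fun x => x) false
    = PySem.List.sorted tags tagKey false := by
  set G := groupsOf tags with hG
  set G' := G.map (fun kv => (kv.1, PySem.List.sorted kv.2 (fun x => x) false)) with hG'
  set N := tags.filter (fun t => !pyHasColon t) with hN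
  set f : String → List String := fun p => (PySem.Dict.mk G').getD p [] with hf
  have hkeys : (PySem.Dict.mk G').keys = G.map Prod.fst := by
    simp [PySem.Dict.keys, hG', List.map_map, Function.comp]
  set S := PySem.List.sorted (G.map Prod.fst) (fun x => x) false with hS
  rw [hkeys]
  have hnodup : (G.map Prod.fst).Nodup := groupsOf_keys_nodup tags
  have hnodup' : (G'.map Prod.fst).Nodup := by
    simpa [hG', List.map_map, Function.comp] using hnodup
  -- characterize the dict lookup on keys
  have hfchar : ∀ kv ∈ G, f kv.1 = PySem.List.sorted kv.2 (fun x => x) false := by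
    intro kv hkv
    have hkv' : (kv.1, PySem.List.sorted kv.2 (fun x => x) false) ∈ G' :=
      List.mem_map.mpr ⟨kv, hkv, rfl⟩
    have := find?_of_nodup G' _ hnodup' hkv'
    simp only [hf, PySem.Dict.getD, PySem.Dict.get?, this]
    rfl
  have hGmem := groupsOf_mem tags
  -- members of f p for p a key
  have hfmem : ∀ kv ∈ G, ∀ x ∈ f kv.1, pyHasColon x = true ∧ pyPrefix x = kv.1 := by
    intro kv hkv x hx
    rw [hfchar kv hkv] at hx
    exact hGmem kv hkv x ((PySem.List.mem_sorted _ _ _ _).mp hx)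
  -- PERMUTATION
  have hperm : (S.flatMap f ++ PySem.List.sorted N (fun x => x) false).Perm tags := by
    have p1 : (S.flatMap f).Perm ((G.map Prod.fst).flatMap f) :=
      (PySem.List.sorted_perm _ _ _).flatMap_right f
    have p2 : (G.map Prod.fst).flatMap f = G.flatMap (fun kv => PySem.List.sorted kv.2 (fun x => x) false) := by
      rw [List.flatMap_map]
      exact List.flatMap_congr (fun kv hkv => hfchar kv hkv)
    have p3 : (G.flatMap (fun kv => PySem.List.sorted kv.2 (fun x => x) false)).Perm
        (G.flatMap Prod.snd) :=
      List.Perm.flatMap_left G (fun kv _ => PySem.List.sorted_perm _ _ _)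
    have p4 : (G.flatMap Prod.snd).Perm (tags.filter pyHasColon) := groupsOf_flatMap_perm tags
    have p5 : (PySem.List.sorted N (fun x => x) false).Perm N := PySem.List.sorted_perm _ _ _
    exact (List.Perm.append ((p1.trans (p2 ▸ p3)).trans p4) p5).trans
      (List.filter_append_perm pyHasColon tags)
  -- SORTEDNESS under the key
  have keymem : ∀ p ∈ S, ∃ kv ∈ G, kv.1 = p := by
    intro p hp
    obtain ⟨kv, hkv, hk⟩ := List.mem_map.mp ((PySem.List.mem_sorted _ _ _ _).mp hp)
    exact ⟨kv, hkv, hk⟩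
  have hkeyx : ∀ kv ∈ G, ∀ x ∈ f kv.1, tagKey x = toLex (toLex (0, kv.1), x) := by
    intro kv hkv x hx
    obtain ⟨hc, hpref⟩ := hfmem kv hkv x hx
    simp only [tagKey, tagKey1, hc, if_true, hpref]
  have hpw : (S.flatMap f ++ PySem.List.sorted N (fun x => x) false).Pairwise
      (fun a b => tagKey a ≤ tagKey b) := by
    rw [List.pairwise_append]
    refine ⟨?_, ?_, ?_⟩
    · rw [List.pairwise_flatMap]
      constructor
      · intro p hp
        obtain ⟨kv, hkv, rfl⟩ := keymem p hp
        rw [hfchar kv hkv]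
        refine (PySem.List.sorted_pairwise kv.2 (fun x => x)).imp_of_mem ?_
        intro a b ha hb hab
        rw [← hfchar kv hkv] at ha hb
        rw [hkeyx kv hkv a ha, hkeyx kv hkv b hb]
        rw [Prod.Lex.le_iff]; right; exact ⟨rfl, hab⟩
      · have hSnodup : S.Nodup := (PySem.List.sorted_perm _ _ _).symm.nodup hnodup
        have hSlt : S.Pairwise (fun a b => a < b) :=
          ((PySem.List.sorted_pairwise (G.map Prod.fst) (fun x => x)).and hSnodup).imp
            (fun h => lt_of_le_of_ne h.1 h.2)
        refine hSlt.imp_of_mem ?_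
        intro p q hpS hqS hpq x hx y hy
        obtain ⟨kvp, hkvp, rfl⟩ := keymem p hpS
        obtain ⟨kvq, hkvq, rfl⟩ := keymem q hqS
        rw [hkeyx kvp hkvp x hx, hkeyx kvq hkvq y hy]
        rw [Prod.Lex.le_iff]; left
        rw [Prod.Lex.lt_iff]; right; exact ⟨rfl, hpq⟩
    · refine (PySem.List.sorted_pairwise N (fun x => x)).imp_of_mem ?_
      intro a b ha hb hab
      have hca : ¬ pyHasColon a = true := by
        have := List.mem_filter.mp ((PySem.List.mem_sorted _ _ _ _).mp ha)
        simpa using this.2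
      have hcb : ¬ pyHasColon b = true := by
        have := List.mem_filter.mp ((PySem.List.mem_sorted _ _ _ _).mp hb)
        simpa using this.2
      simp only [tagKey, tagKey1, hca, hcb]
      rw [Prod.Lex.le_iff]; right; exact ⟨rfl, hab⟩
    · intro x hx y hy
      obtain ⟨p, hpS, hxf⟩ := List.mem_flatMap.mp hx
      obtain ⟨kv, hkv, rfl⟩ := keymem p hpS
      have hcy : ¬ pyHasColon y = true := by
        have := List.mem_filter.mp ((PySem.List.mem_sorted _ _ _ _).mp hy)
        simpa using this.2
      rw [hkeyx kv hkv x hxf]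
      simp only [tagKey, tagKey1, hcy]
      rw [Prod.Lex.le_iff]; left
      rw [Prod.Lex.lt_iff]; left; simp
  exact List.Perm.eq_of_pairwise
    (fun a b _ _ h1 h2 => tagKey_inj (le_antisymm h1 h2))
    hpw (PySem.List.sorted_pairwise tags tagKey)
    (hperm.trans (PySem.List.sorted_perm tags tagKey false).symm)


-- ===== VERDICT (by name: the statement is the Claim_ definition above) =====
theorem sort_tags_by_prefix_spec : Claim_equal_sort_tags_by_prefix := by
  intro tags _
  unfold Spec_sort_tags_by_prefix
  rw [alt_eq_sorted]
  unfold sort_tags_by_prefix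
  by_cases h0 : tags = []
  · rw [if_pos h0, h0]
    rfl
  · rw [if_neg h0]
    show (PySem.List.sorted _ (fun x => x) false).foldl _ [] ++ _ = _
    rw [show (PySem.Dict.empty : PySem.Dict String (List String)) = PySem.Dict.mk [] from rfl,
        foldA_eq tags [] [] (by simp)]
    rw [PySem.List.foldl_append_eq_flatMap, List.nil_append, List.nil_append]
    exact main_nonempty tags
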